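-- pv_equiv track=rewrite | github.com/kiforsbe/misc_scripts | netflix_watch_status.py | summarize_unmapped_imdb_override_rows
-- ===== SOURCE A (Python) =====
-- from typing import Any, Dict, List, Optional, Tuple
--
-- def summarize_unmapped_imdb_override_rows(rows: List[Dict[str, str]]) -> Dict[str, int]:
--     failed_rows = [row for row in rows if row.get("imdb_mapping_status") != "mapped"]
--     override_pass_rows = [
--         row for row in rows
--         if row.get("imdb_mapping_status") == "mapped" and row.get("had_override") == "yes"
--     ]
--     with_override = sum(1 for row in failed_rows if row.get("had_override") == "yes")
--     return {
--         "export_total": len(rows),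
--         "failed": len(failed_rows),
--         "override_passed": len(override_pass_rows),
--         "total": len(failed_rows),
--         "with_override": with_override,
--         "without_override": len(failed_rows) - with_override,
--     }
-- ===== SOURCE B (Python) =====
-- def summarize_unmapped_imdb_override_rows(rows):
--     failed = 0
--     override_passed = 0
--     with_override = 0
--     for row in rows:
--         had = row.get("had_override") == "yes"
--         if row.get("imdb_mapping_status") == "mapped":
--             if had:
--                 override_passed += 1
--         else:
--             failed += 1
--             if had:
--                 with_override += 1
--     return {
--         "export_total": len(rows),
--         "failed": failed,
--         "override_passed": override_passed,
--         "total": failed,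
--         "with_override": with_override,
--         "without_override": failed - with_override,
--     }
-- ===== Notes on version B (the rewrite author's own statement) =====
-- stated objective: simpler
-- what changed: Replaces the two filtered intermediate lists and the generator sum with one pass over rows maintaining three integer counters.
import Mathlib
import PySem

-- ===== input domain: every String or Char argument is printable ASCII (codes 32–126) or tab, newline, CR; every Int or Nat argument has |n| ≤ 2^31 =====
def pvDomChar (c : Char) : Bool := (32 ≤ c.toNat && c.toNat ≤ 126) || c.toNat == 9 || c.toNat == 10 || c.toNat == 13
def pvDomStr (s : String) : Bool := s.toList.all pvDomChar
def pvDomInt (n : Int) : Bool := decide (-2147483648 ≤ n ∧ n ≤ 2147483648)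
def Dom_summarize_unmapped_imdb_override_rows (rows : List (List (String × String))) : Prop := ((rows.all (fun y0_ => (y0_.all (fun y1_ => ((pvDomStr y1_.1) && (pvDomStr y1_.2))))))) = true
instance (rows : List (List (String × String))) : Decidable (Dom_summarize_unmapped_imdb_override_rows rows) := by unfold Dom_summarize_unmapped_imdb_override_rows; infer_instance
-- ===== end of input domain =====

-- ===== PORT A =====
-- one honest line: B replaces A's two filtered lists and generator sum by a single pass with three integer counters (simpler, same cost class)
-- row.get(k): first match in the association list (Python dict has unique keys; assoc-list first match is the convention)
def pvGetRow (row : List (String × String)) (k : String) : Option String :=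
  (PySem.Dict.mk row).get? k

def summarize_unmapped_imdb_override_rows (rows : List (List (String × String))) : List (String × Int) :=
  let failed_rows := rows.filter (fun row => !(pvGetRow row "imdb_mapping_status" == some "mapped"))
  let override_pass_rows := rows.filter (fun row =>
    (pvGetRow row "imdb_mapping_status" == some "mapped") && (pvGetRow row "had_override" == some "yes"))
  let with_override : Int := (failed_rows.filter (fun row => pvGetRow row "had_override" == some "yes")).length
  [("export_total", (rows.length : Int)),
   ("failed", (failed_rows.length : Int)),
   ("override_passed", (override_pass_rows.length : Int)),
   ("total", (failed_rows.length : Int)),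
   ("with_override", with_override),
   ("without_override", (failed_rows.length : Int) - with_override)]

-- ===== PORT B =====
def pvCountStep (st : Int × Int × Int) (row : List (String × String)) : Int × Int × Int :=
  let had := pvGetRow row "had_override" == some "yes"
  if pvGetRow row "imdb_mapping_status" == some "mapped" then
    (st.1, (if had then st.2.1 + 1 else st.2.1), st.2.2)
  else
    (st.1 + 1, st.2.1, (if had then st.2.2 + 1 else st.2.2))

def summarize_unmapped_imdb_override_rows_alt (rows : List (List (String × String))) : List (String × Int) :=
  let st := rows.foldl pvCountStep (0, 0, 0)
  [("export_total", (rows.length : Int)),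
   ("failed", st.1),
   ("override_passed", st.2.1),
   ("total", st.1),
   ("with_override", st.2.2),
   ("without_override", st.1 - st.2.2)]

-- ===== PRECONDITION & SPEC =====
def Spec_summarize_unmapped_imdb_override_rows (rows : List (List (String × String))) (out : List (String × Int)) : Prop := out = summarize_unmapped_imdb_override_rows_alt rows
instance (rows : List (List (String × String))) (out : List (String × Int)) : Decidable (Spec_summarize_unmapped_imdb_override_rows rows out) := by unfold Spec_summarize_unmapped_imdb_override_rows; infer_instance

-- ===== CLAIM (what is proved, stated in full; the proofs are below) =====
def Claim_equal_summarize_unmapped_imdb_override_rows : Prop := ∀ (rows : List (List (String × String))), Dom_summarize_unmapped_imdb_override_rows rows → Spec_summarize_unmapped_imdb_override_rows rows (summarize_unmapped_imdb_override_rows rows)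

-- ===== LEMMAS AND PROOFS =====

-- ===== VERDICT (by name: the statement is the Claim_ definition above) =====
lemma pvCountStep_spec (rows : List (List (String × String))) (a b c : Int) :
    rows.foldl pvCountStep (a, b, c) =
      (a + (rows.countP (fun row => !(pvGetRow row "imdb_mapping_status" == some "mapped"))),
       b + (rows.countP (fun row =>
         (pvGetRow row "imdb_mapping_status" == some "mapped") && (pvGetRow row "had_override" == some "yes"))),
       c + (rows.countP (fun row =>
         !(pvGetRow row "imdb_mapping_status" == some "mapped") && (pvGetRow row "had_override" == some "yes")))) := by
  induction rows generalizing a b c with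
  | nil => simp
  | cons r rs ih =>
    simp only [List.foldl_cons, List.countP_cons, pvCountStep]
    rw [ih]
    by_cases hm : (pvGetRow r "imdb_mapping_status" == some "mapped") = true <;>
      by_cases hh : (pvGetRow r "had_override" == some "yes") = true <;>
        simp [hm, hh] <;> and_intros <;> omega

-- ===== VERDICT (by name: the statement is the Claim_ definition above) =====
theorem summarize_unmapped_imdb_override_rows_spec : Claim_equal_summarize_unmapped_imdb_override_rows := by
  intro rows _
  unfold Spec_summarize_unmapped_imdb_override_rows
  unfold summarize_unmapped_imdb_override_rows summarize_unmapped_imdb_override_rows_alt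
  rw [pvCountStep_spec]
  simp [List.countP_eq_length_filter, Bool.and_comm]
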